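-- pv_equiv track=rewrite | github.com/nomadbarefoot/TRANSMUTE-SWARM | agents/agent.py | apply_sliding_window
-- ===== SOURCE A (Python) =====
-- SLIDING_WINDOW_PAIRS = 6
--
-- def apply_sliding_window(messages: list[dict], keep_pairs: int = SLIDING_WINDOW_PAIRS) -> list[dict]:
--     """
--     Keep system message + initial user message + last `keep_pairs` exchange pairs.
--     An exchange pair = one assistant message (with tool calls) + its tool result messages.
--     """
--     if len(messages) <= 2:
--         return messages
--
--     header = messages[:2]
--     tail = messages[2:]
--
--     # Group tail into exchange pairs: each pair starts with an assistant message
--     pairs: list[list[dict]] = []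
--     current: list[dict] = []
--     for msg in tail:
--         if msg["role"] == "assistant" and current:
--             pairs.append(current)
--             current = [msg]
--         else:
--             current.append(msg)
--     if current:
--         pairs.append(current)
--
--     # Keep only the last `keep_pairs`
--     kept = pairs[-keep_pairs:] if len(pairs) > keep_pairs else pairs
--     result = header[:]
--     for pair in kept:
--         result.extend(pair)
--     return result
-- ===== SOURCE B (Python) =====
-- SLIDING_WINDOW_PAIRS = 6
--
-- def apply_sliding_window(messages: list[dict], keep_pairs: int = SLIDING_WINDOW_PAIRS) -> list[dict]:
--     """Keep header (first two messages) + last `keep_pairs` exchange pairs.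
--
--     Single backward pass over the tail collecting messages until the
--     keep_pairs-th assistant message from the end, instead of building the
--     intermediate list of pairs and slicing it.
--     """
--     if len(messages) <= 2:
--         return messages
--     kept = []
--     count = 0
--     for msg in reversed(messages[2:]):
--         kept.append(msg)
--         if msg["role"] == "assistant":
--             count += 1
--             if count == keep_pairs:
--                 break
--     kept.reverse()
--     return messages[:2] + kept
-- ===== Notes on version B (the rewrite author's own statement) =====
-- stated objective: simpler
-- what changed: B replaces A's build-list-of-exchange-pairs-then-slice-and-reflatten by a single backward walk over the tail that collects messages until the keep_pairs-th assistant message from the end, so no intermediate pairs list is built.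
import Mathlib
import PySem

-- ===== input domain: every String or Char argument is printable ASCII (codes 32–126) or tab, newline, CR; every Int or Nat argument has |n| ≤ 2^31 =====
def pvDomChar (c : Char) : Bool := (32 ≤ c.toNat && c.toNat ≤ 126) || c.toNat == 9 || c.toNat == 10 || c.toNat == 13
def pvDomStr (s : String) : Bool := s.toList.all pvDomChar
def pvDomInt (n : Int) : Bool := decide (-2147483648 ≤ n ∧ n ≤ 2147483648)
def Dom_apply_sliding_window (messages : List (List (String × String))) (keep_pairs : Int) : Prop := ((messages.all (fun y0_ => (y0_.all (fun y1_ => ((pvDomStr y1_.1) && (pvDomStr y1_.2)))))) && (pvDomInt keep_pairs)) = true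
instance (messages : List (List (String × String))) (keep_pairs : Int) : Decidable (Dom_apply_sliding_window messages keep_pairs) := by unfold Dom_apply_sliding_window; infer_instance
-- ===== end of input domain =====

-- B replaces A's group-into-pairs-then-slice by a single backward pass over the tail
-- that stops at the keep_pairs-th assistant message from the end (objective: simpler).
-- Equivalence is about the RETURN value only (A returns the argument object itself when len<=2; so does B).

-- msg["role"] (both programs read it this way)
def pvRole (m : List (String × String)) : String :=
  PySem.Dict.getD (PySem.Dict.mk m) "role" ""

-- ===== PORT A =====
def pvStepA (pc : List (List (List (String × String))) × List (List (String × String)))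
    (msg : List (String × String)) :
    List (List (List (String × String))) × List (List (String × String)) :=
  if pvRole msg == "assistant" && !pc.2.isEmpty then (pc.1 ++ [pc.2], [msg])
  else (pc.1, pc.2 ++ [msg])

def apply_sliding_window (messages : List (List (String × String))) (keep_pairs : Int) : List (List (String × String)) :=
  if (messages.length : Int) ≤ 2 then messages
  else
    let header := PySem.List.slice messages none (some 2)
    let tail := PySem.List.slice messages (some 2) none
    let pc := tail.foldl pvStepA ([], [])
    let pairs := if pc.2.isEmpty then pc.1 else pc.1 ++ [pc.2]
    let kept := if (pairs.length : Int) > keep_pairs then PySem.List.slice pairs (some (-keep_pairs)) none else pairs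
    kept.foldl (fun r p => r ++ p) header

-- ===== PORT B =====
def pvCollectB (keep_pairs : Int) : List (List (String × String)) → Int → List (List (String × String))
  | [], _ => []
  | m :: r, count =>
    if pvRole m == "assistant" then
      if count + 1 = keep_pairs then [m]
      else m :: pvCollectB keep_pairs r (count + 1)
    else m :: pvCollectB keep_pairs r count

def apply_sliding_window_alt (messages : List (List (String × String))) (keep_pairs : Int) : List (List (String × String)) :=
  if (messages.length : Int) ≤ 2 then messages
  else
    PySem.List.slice messages none (some 2) ++
      (pvCollectB keep_pairs (PySem.List.slice messages (some 2) none).reverse 0).reverse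

-- ===== PRECONDITION & SPEC =====
-- Pre_ excludes (a) messages after the first two that lack a "role" key, on which A raises KeyError,
-- and (b) negative keep_pairs when there is a tail to trim, outside the function's natural domain,
-- where A's pairs[-keep_pairs:] slice accidentally drops pairs from the FRONT (B keeps everything there).
def Pre_apply_sliding_window (messages : List (List (String × String))) (keep_pairs : Int) : Prop :=
  ((messages.length : Int) ≤ 2 ∨ 0 ≤ keep_pairs) ∧ ∀ m ∈ messages.drop 2, (PySem.Dict.get? (PySem.Dict.mk m) "role").isSome = true
instance (messages : List (List (String × String))) (keep_pairs : Int) : Decidable (Pre_apply_sliding_window messages keep_pairs) := by unfold Pre_apply_sliding_window; infer_instance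

def pvWitness_apply_sliding_window : (List (List (String × String))) × Int :=
  ([[("role", "system")], [("role", "user")], [("role", "assistant")], [("role", "tool")],
    [("role", "assistant")], [("role", "tool")]], 1)

def Spec_apply_sliding_window (messages : List (List (String × String))) (keep_pairs : Int) (out : List (List (String × String))) : Prop := out = apply_sliding_window_alt messages keep_pairs
instance (messages : List (List (String × String))) (keep_pairs : Int) (out : List (List (String × String))) : Decidable (Spec_apply_sliding_window messages keep_pairs out) := by unfold Spec_apply_sliding_window; infer_instance

-- ===== CLAIM (what is proved, stated in full; the proofs are below) =====
def Claim_equal_apply_sliding_window : Prop := ∀ (messages : List (List (String × String))) (keep_pairs : Int), Dom_apply_sliding_window messages keep_pairs → Pre_apply_sliding_window messages keep_pairs → Spec_apply_sliding_window messages keep_pairs (apply_sliding_window messages keep_pairs)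

-- ===== LEMMAS AND PROOFS =====

-- split a list into the assistant-free prefix and the assistant-headed groups
def pvChunk : List (List (String × String)) → List (List (String × String)) × List (List (List (String × String)))
  | [] => ([], [])
  | m :: r =>
    let fg := pvChunk r
    if pvRole m == "assistant" then ([], (m :: fg.1) :: fg.2) else (m :: fg.1, fg.2)

def pvFree (l : List (List (String × String))) : Prop :=
  ∀ m ∈ l, (pvRole m == "assistant") = false

def pvGroups (gs : List (List (List (String × String)))) : Prop :=
  ∀ g ∈ gs, ∃ a b, g = a :: b ∧ (pvRole a == "assistant") = true ∧ pvFree b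

lemma pvChunk_flatten (l : List (List (String × String))) :
    (pvChunk l).1 ++ (pvChunk l).2.flatten = l := by
  induction l with
  | nil => simp [pvChunk]
  | cons m r ih =>
    simp only [pvChunk]
    by_cases h : (pvRole m == "assistant") = true
    · simp [h, ih]
    · simp only [Bool.not_eq_true] at h
      simp [h, ih]

lemma pvChunk_props (l : List (List (String × String))) :
    pvFree (pvChunk l).1 ∧ pvGroups (pvChunk l).2 := by
  induction l with
  | nil => exact ⟨by simp [pvFree, pvChunk], by simp [pvGroups, pvChunk]⟩
  | cons m r ih =>
    obtain ⟨hf, hg⟩ := ih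
    simp only [pvChunk]
    by_cases h : (pvRole m == "assistant") = true
    · refine ⟨by simp [pvFree, h], ?_⟩
      intro g hgmem
      simp [h] at hgmem
      rcases hgmem with hgmem | hgmem
      · exact ⟨m, (pvChunk r).1, hgmem, h, hf⟩
      · exact hg g hgmem
    · simp only [Bool.not_eq_true] at h
      refine ⟨?_, by simpa [pvGroups, h] using hg⟩
      intro x hx
      simp [h] at hx
      rcases hx with rfl | hx
      · exact h
      · exact hf x hx

lemma pvFoldA (l : List (List (String × String)))
    (ps : List (List (List (String × String)))) (cur : List (List (String × String)))
    (hcur : cur ≠ []) :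
    (List.foldl pvStepA (ps, cur) l).2 ≠ [] ∧
    (List.foldl pvStepA (ps, cur) l).1 ++ [(List.foldl pvStepA (ps, cur) l).2]
      = ps ++ (cur ++ (pvChunk l).1) :: (pvChunk l).2 := by
  induction l generalizing ps cur with
  | nil => simpa [pvChunk] using hcur
  | cons m r ih =>
    simp only [List.foldl_cons, pvStepA, pvChunk]
    by_cases h : (pvRole m == "assistant") = true
    · have hne : cur.isEmpty = false := by simpa [List.isEmpty_iff] using hcur
      simp only [h, hne, Bool.not_false, Bool.and_true, if_true]
      obtain ⟨h1, h2⟩ := ih (ps ++ [cur]) [m] (by simp)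
      refine ⟨h1, ?_⟩
      rw [h2]
      simp
    · simp only [Bool.not_eq_true] at h
      simp only [h, Bool.false_and, Bool.false_eq_true, if_false]
      obtain ⟨h1, h2⟩ := ih ps (cur ++ [m]) (by simp)
      refine ⟨h1, ?_⟩
      rw [h2]
      simp

lemma pvCollect_free (kp : Int) (l rest : List (List (String × String))) (c : Int)
    (h : pvFree l) : pvCollectB kp (l ++ rest) c = l ++ pvCollectB kp rest c := by
  induction l with
  | nil => simp
  | cons m r ih =>
    have hm : (pvRole m == "assistant") = false := h m (by simp)
    have hr : pvFree r := fun x hx => h x (by simp [hx])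
    simp [pvCollectB, hm, ih hr]

lemma pvCollect_main (kp : Int) (gs : List (List (List (String × String))))
    (hgs : pvGroups gs) (c0 : List (String × String)) (f : List (List (String × String)))
    (hf : pvFree f) (c : Int) :
    pvCollectB kp (((c0 :: f) :: gs).flatten).reverse c =
      if 1 ≤ kp - c ∧ kp - c ≤ (gs.length : Int)
      then ((gs.drop (gs.length - (kp - c).toNat)).flatten).reverse
      else (((c0 :: f) :: gs).flatten).reverse := by
  induction gs using List.reverseRecOn generalizing c with
  | nil =>
    have hfr : pvFree f.reverse := fun m hm => hf m (by simpa using hm)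
    have : pvCollectB kp (f.reverse ++ [c0]) c = f.reverse ++ [c0] := by
      rw [pvCollect_free kp f.reverse [c0] c hfr]
      by_cases h : (pvRole c0 == "assistant") = true
      · by_cases h2 : c + 1 = kp <;> simp [pvCollectB, h, h2]
      · simp only [Bool.not_eq_true] at h
        simp [pvCollectB, h]
    simpa [this] using by omega
  | append_singleton gs' g ihg =>
    obtain ⟨a, b, rfl, ha, hb⟩ := hgs g (by simp)
    have hgs' : pvGroups gs' := fun x hx => hgs x (by simp [hx])
    have hbr : pvFree b.reverse := fun m hm => hb m (by simpa using hm)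
    have hflat : (((c0 :: f) :: (gs' ++ [a :: b])).flatten).reverse
        = b.reverse ++ a :: (((c0 :: f) :: gs').flatten).reverse := by
      simp
    rw [hflat, pvCollect_free kp b.reverse _ c hbr]
    simp only [pvCollectB, ha, if_true]
    by_cases hbreak : c + 1 = kp
    · have hcond : 1 ≤ kp - c ∧ kp - c ≤ ((gs' ++ [a :: b]).length : Int) := by
        simp; omega
      rw [if_pos hcond]
      have hkpc : kp - c = 1 := by omega
      have h1 : ((gs' ++ [a :: b]).length - ((1 : Int)).toNat) = gs'.length := by simp
      have hdrop : (gs' ++ [a :: b]).drop ((gs' ++ [a :: b]).length - (kp - c).toNat)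
          = [a :: b] := by
        rw [hkpc, h1, List.drop_left]
      rw [hdrop, if_pos hbreak]
      simp
    · rw [if_neg hbreak]
      rw [ihg hgs' (c + 1)]
      by_cases hcond' : 1 ≤ kp - (c + 1) ∧ kp - (c + 1) ≤ (gs'.length : Int)
      · rw [if_pos hcond']
        have hcond : 1 ≤ kp - c ∧ kp - c ≤ ((gs' ++ [a :: b]).length : Int) := by
          simp; omega
        rw [if_pos hcond]
        have hlen : (gs' ++ [a :: b]).length = gs'.length + 1 := by simp
        have hidx : (gs' ++ [a :: b]).length - (kp - c).toNat
            = gs'.length - (kp - (c + 1)).toNat := by omega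
        rw [hidx, List.drop_append_of_le_length (Nat.sub_le _ _)]
        simp
      · rw [if_neg hcond']
        have hcond : ¬ (1 ≤ kp - c ∧ kp - c ≤ ((gs' ++ [a :: b]).length : Int)) := by
          simp only [List.length_append, List.length_cons, List.length_nil] at *
          push_cast at *
          omega
        rw [if_neg hcond]

lemma pvFoldl_append (l : List (List (List (String × String))))
    (acc : List (List (String × String))) :
    l.foldl (fun r p => r ++ p) acc = acc ++ l.flatten := by
  induction l generalizing acc with
  | nil => simp
  | cons h t ih => simp [List.foldl_cons, ih]

lemma pvMain (messages : List (List (String × String))) (kp : Int) (hkp : 0 ≤ kp) :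
    apply_sliding_window messages kp = apply_sliding_window_alt messages kp := by
  by_cases hlen : (messages.length : Int) ≤ 2
  · simp [apply_sliding_window, apply_sliding_window_alt, hlen]
  · have htake : PySem.List.slice messages none (some 2) = messages.take 2 := by
      rw [PySem.List.slice_to messages (by norm_num)]
      rfl
    have hdropm : PySem.List.slice messages (some 2) none = messages.drop 2 := by
      rw [PySem.List.slice_from messages (by norm_num)]
      rfl
    cases htail : messages.drop 2 with
    | nil =>
      exfalso
      have := congrArg List.length htail
      simp at this
      omega
    | cons t0 rts =>
      obtain ⟨hfree, hgroups⟩ := pvChunk_props rts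
      have hflat : ((t0 :: (pvChunk rts).1) :: (pvChunk rts).2).flatten = t0 :: rts := by
        have := pvChunk_flatten rts
        simp only [List.flatten_cons, List.cons_append]
        rw [this]
      have hstep0 : pvStepA ([], []) t0 = ([], [t0]) := by simp [pvStepA]
      obtain ⟨hne, heq⟩ := pvFoldA rts [] [t0] (by simp)
      have hne' : (List.foldl pvStepA ([], [t0]) rts).2.isEmpty = false := by
        simpa [List.isEmpty_iff] using hne
      have hB : pvCollectB kp (t0 :: rts).reverse 0 =
          if 1 ≤ kp ∧ kp ≤ ((pvChunk rts).2.length : Int)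
          then (((pvChunk rts).2.drop ((pvChunk rts).2.length - kp.toNat)).flatten).reverse
          else (t0 :: rts).reverse := by
        rw [← hflat, pvCollect_main kp _ hgroups t0 _ hfree 0]
        simp only [sub_zero, hflat]
      simp only [apply_sliding_window, apply_sliding_window_alt, if_neg hlen, htake, hdropm,
        htail, List.foldl_cons, hstep0, hne', Bool.false_eq_true, if_false, hB]
      rw [pvFoldl_append]
      simp only [List.cons_append, List.nil_append] at heq
      rw [heq]
      by_cases hgt : kp < (((t0 :: (pvChunk rts).1) :: (pvChunk rts).2).length : Int)
      · rw [if_pos (by exact_mod_cast hgt)]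
        by_cases hz : kp = 0
        · subst hz
          rw [show -(0 : Int) = (0 : Int) by norm_num,
            PySem.List.slice_zero_start _ none, PySem.List.slice_none_none]
          rw [if_neg (by omega), hflat]
          simp
        · have hk1 : 0 < kp.toNat := by omega
          have hklen : kp ≤ ((pvChunk rts).2.length : Int) := by
            simp only [List.length_cons] at hgt
            push_cast at hgt ⊢
            omega
          have hnegk : -kp = -((kp.toNat : Nat) : Int) := by
            rw [Int.toNat_of_nonneg hkp]
          rw [hnegk, PySem.List.slice_from_neg_natCast _ _ hk1]
          have hidx : ((t0 :: (pvChunk rts).1) :: (pvChunk rts).2).length - kp.toNat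
              = ((pvChunk rts).2.length - kp.toNat) + 1 := by
            simp only [List.length_cons]
            have : kp.toNat ≤ (pvChunk rts).2.length := by omega
            omega
          rw [hidx, List.drop_succ_cons]
          rw [if_pos ⟨by omega, hklen⟩]
          simp
      · rw [if_neg (by exact_mod_cast hgt)]
        have : ¬ (1 ≤ kp ∧ kp ≤ ((pvChunk rts).2.length : Int)) := by
          simp only [List.length_cons] at hgt
          push_cast at hgt ⊢
          omega
        rw [if_neg this, hflat]
        simp

-- ===== VERDICT (by name: the statement is the Claim_ definition above) =====
theorem apply_sliding_window_spec : Claim_equal_apply_sliding_window := by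
  intro messages keep_pairs _ hpre
  by_cases hlen : (messages.length : Int) ≤ 2
  · show apply_sliding_window messages keep_pairs = apply_sliding_window_alt messages keep_pairs
    simp [apply_sliding_window, apply_sliding_window_alt, hlen]
  · exact pvMain messages keep_pairs (hpre.1.resolve_left hlen)
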